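-- pv_equiv track=rewrite | github.com/nebulous42069/diggz | nexus/plugin.video.watchnixtoons2/lib/plugin.py | catalogFromIterable
-- ===== SOURCE A (Python) =====
-- from string import ascii_uppercase
--
-- def catalogFromIterable(iterable):
--
--     catalog = {key: [ ] for key in ascii_uppercase}
--     misc_section = catalog['#'] = [ ]
--     for item in iterable:
--         key = item[1][0].upper()
--         if key in catalog:
--             catalog[key].append(item)
--         else:
--             misc_section.append(item)
--     return catalog
-- ===== SOURCE B (Python) =====
-- from string import ascii_uppercase
--
-- def catalogFromIterable(iterable):
--     items = list(iterable)
--     letters = set(ascii_uppercase)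
--     catalog = {letter: [it for it in items if it[1][0].upper() == letter]
--                for letter in ascii_uppercase}
--     catalog['#'] = [it for it in items if it[1][0].upper() not in letters]
--     return catalog
-- ===== Notes on version B (the rewrite author's own statement) =====
-- stated objective: alternative
-- what changed: A's single bucketing pass that mutates dict buckets is replaced by a per-letter filtering comprehension: 27 independent scans of the materialized item list, one filter per catalog key.
import Mathlib
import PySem

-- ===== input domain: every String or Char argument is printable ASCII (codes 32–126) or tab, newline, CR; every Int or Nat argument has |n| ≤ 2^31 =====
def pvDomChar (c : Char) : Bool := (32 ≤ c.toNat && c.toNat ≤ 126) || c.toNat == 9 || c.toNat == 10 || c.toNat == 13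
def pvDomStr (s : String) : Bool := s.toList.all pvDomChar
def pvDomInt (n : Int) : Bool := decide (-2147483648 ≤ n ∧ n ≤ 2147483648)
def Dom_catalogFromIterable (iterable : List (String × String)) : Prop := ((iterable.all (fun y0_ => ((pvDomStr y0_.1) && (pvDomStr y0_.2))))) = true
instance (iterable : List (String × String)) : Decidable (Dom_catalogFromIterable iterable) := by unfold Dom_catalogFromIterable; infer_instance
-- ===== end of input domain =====

-- B builds each bucket by its own filter pass over the materialized items instead of A's one
-- mutating bucketing pass; same return value (alternative decomposition, no speed claim).

-- ascii_uppercase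
def pvLetters : List String :=
  ["A","B","C","D","E","F","G","H","I","J","K","L","M",
   "N","O","P","Q","R","S","T","U","V","W","X","Y","Z"]

-- item[1][0].upper() — exact for nonempty ASCII strings (Pre_ excludes the empty ones, where Python raises IndexError)
def pvKey (s : String) : String :=
  match s.toList with
  | [] => ""
  | c :: _ => String.mk [PySem.Chars.upperChar c]

-- ===== PORT A =====
-- catalog[k].append(x): find first entry with key k, append x to its bucket (hand port, exact: keys are unique)
def pvAppendAt (cat : List (String × List (String × String))) (k : String) (x : String × String) :
    List (String × List (String × String)) :=
  match cat with
  | [] => []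
  | (k', v) :: rest => if k' = k then (k', v ++ [x]) :: rest else (k', v) :: pvAppendAt rest k x

def catalogFromIterable (iterable : List (String × String)) : List (String × List (String × String)) :=
  let catalog := pvLetters.map (fun k => (k, ([] : List (String × String)))) ++ [("#", ([] : List (String × String)))]
  -- misc_section IS catalog['#'] (same list object), so the else-branch appends at key "#"
  iterable.foldl (fun cat item =>
    let key := pvKey item.2
    if cat.any (fun p => p.1 == key) then pvAppendAt cat key item
    else pvAppendAt cat "#" item) catalog

-- ===== PORT B =====
def catalogFromIterable_alt (iterable : List (String × String)) : List (String × List (String × String)) :=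
  let items := iterable
  pvLetters.map (fun L => (L, items.filter (fun it => pvKey it.2 == L)))
    ++ [("#", items.filter (fun it => !(pvLetters.contains (pvKey it.2))))]

-- ===== PRECONDITION & SPEC =====
-- Pre_ excludes items whose second component is empty: there Python A (and B) raise IndexError on item[1][0]
def Pre_catalogFromIterable (iterable : List (String × String)) : Prop :=
  ∀ it ∈ iterable, it.2 ≠ ""
instance (iterable : List (String × String)) : Decidable (Pre_catalogFromIterable iterable) := by
  unfold Pre_catalogFromIterable; infer_instance
def pvWitness_catalogFromIterable : (List (String × String)) := [("url1", "Alpha"), ("url2", "#tag")]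

def Spec_catalogFromIterable (iterable : List (String × String)) (out : List (String × List (String × String))) : Prop := out = catalogFromIterable_alt iterable
instance (iterable : List (String × String)) (out : List (String × List (String × String))) : Decidable (Spec_catalogFromIterable iterable out) := by unfold Spec_catalogFromIterable; infer_instance

-- ===== CLAIM (what is proved, stated in full; the proofs are below) =====
def Claim_equal_catalogFromIterable : Prop := ∀ (iterable : List (String × String)), Dom_catalogFromIterable iterable → Pre_catalogFromIterable iterable → Spec_catalogFromIterable iterable (catalogFromIterable iterable)

-- ===== LEMMAS AND PROOFS =====

-- the catalog after processing the prefix xs, in B's shape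
def pvCatState (xs : List (String × String)) : List (String × List (String × String)) :=
  pvLetters.map (fun L => (L, xs.filter (fun it => pvKey it.2 == L)))
    ++ [("#", xs.filter (fun it => !(pvLetters.contains (pvKey it.2))))]

lemma pvAppendAt_map_mem (ls : List String) (f : String → List (String × String))
    (rest : List (String × List (String × String))) (k : String) (x : String × String)
    (hnd : ls.Nodup) (hk : k ∈ ls) :
    pvAppendAt (ls.map (fun L => (L, f L)) ++ rest) k x
      = ls.map (fun L => (L, if L = k then f L ++ [x] else f L)) ++ rest := by
  induction ls with
  | nil => cases hk
  | cons a ls ih =>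
    simp only [List.map_cons, List.cons_append, pvAppendAt]
    rcases List.nodup_cons.mp hnd with ⟨ha, hnd'⟩
    by_cases h : a = k
    · subst h
      have hmap : ∀ L ∈ ls, ((L, if L = a then f L ++ [x] else f L)) = ((L, f L)) := by
        intro L hL
        have : L ≠ a := fun e => ha (e ▸ hL)
        simp [this]
      simp [List.map_congr_left hmap]
    · have hk' : k ∈ ls := by
        rcases List.mem_cons.mp hk with h' | h'
        · exact absurd h'.symm h
        · exact h'
      simp only [if_neg h]
      rw [ih hnd' hk']

lemma pvAppendAt_map_not_mem (ls : List String) (f : String → List (String × String))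
    (rest : List (String × List (String × String))) (k : String) (x : String × String)
    (hk : k ∉ ls) :
    pvAppendAt (ls.map (fun L => (L, f L)) ++ rest) k x
      = ls.map (fun L => (L, f L)) ++ pvAppendAt rest k x := by
  induction ls with
  | nil => simp
  | cons a ls ih =>
    have ha : a ≠ k := fun e => hk (e ▸ List.mem_cons_self ..)
    simp only [List.map_cons, List.cons_append, pvAppendAt, if_neg ha]
    rw [ih (fun h => hk (List.mem_cons_of_mem _ h))]

lemma pvAnyKeys (f : String → List (String × String)) (m : List (String × String)) (k : String) :
    ((pvLetters.map (fun L => (L, f L)) ++ [("#", m)]).any (fun p => p.1 == k))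
      = (pvLetters.any (fun L => L == k) || ("#" == k)) := by
  simp [List.any_map, Function.comp_def]

lemma pvStep (xs : List (String × String)) (x : String × String) :
    (if ((pvCatState xs).any fun p => p.1 == pvKey x.2)
       then pvAppendAt (pvCatState xs) (pvKey x.2) x
       else pvAppendAt (pvCatState xs) "#" x)
    = pvCatState (xs ++ [x]) := by
  have hnd : pvLetters.Nodup := by decide
  have hhash : "#" ∉ pvLetters := by decide
  simp only [pvCatState]
  by_cases hk : pvKey x.2 ∈ pvLetters
  · -- key is a letter: condition true, append at that letter's bucket
    rw [pvAnyKeys]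
    have hany : pvLetters.any (fun L => L == pvKey x.2) = true := by
      simp only [List.any_eq_true]; exact ⟨_, hk, by simp⟩
    rw [hany, Bool.true_or, if_pos rfl]
    rw [pvAppendAt_map_mem _ _ _ _ _ hnd hk]
    congr 1
    · apply List.map_congr_left
      intro L hL
      by_cases h : L = pvKey x.2
      · subst h
        simp [List.filter_append]
      · have hne : (pvKey x.2 == L) = false := by
          simp; exact fun e => h e.symm
        simp [List.filter_append, hne, h]
    · have : (!(pvLetters.contains (pvKey x.2))) = false := by simp [hk]
      simp [List.filter_append, hk]
  · -- key is not a letter: both branches append at "#"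
    have happ :
        pvAppendAt (pvLetters.map (fun L => (L, xs.filter (fun it => pvKey it.2 == L)))
            ++ [("#", xs.filter (fun it => !(pvLetters.contains (pvKey it.2))))]) "#" x
          = pvLetters.map (fun L => (L, (xs ++ [x]).filter (fun it => pvKey it.2 == L)))
            ++ [("#", (xs ++ [x]).filter (fun it => !(pvLetters.contains (pvKey it.2))))] := by
      rw [pvAppendAt_map_not_mem _ _ _ _ _ hhash]
      congr 1
      · apply List.map_congr_left
        intro L hL
        have hne : (pvKey x.2 == L) = false := by
          simp; exact fun e => hk (e ▸ hL)
        simp [List.filter_append, hne]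
      · simp [pvAppendAt, List.filter_append, hk]
    rw [pvAnyKeys]
    have hany : pvLetters.any (fun L => L == pvKey x.2) = false := by
      simp only [List.any_eq_false]
      intro L hL
      simp only [beq_iff_eq]
      exact fun e => hk (e ▸ hL)
    rw [hany]
    simp only [Bool.false_or, beq_iff_eq]
    by_cases hhk : "#" = pvKey x.2
    · rw [if_pos hhk, ← hhk]
      exact happ
    · rw [if_neg hhk]
      exact happ

lemma pvFold (l xs : List (String × String)) :
    l.foldl (fun cat item =>
      let key := pvKey item.2
      if cat.any (fun p => p.1 == key) then pvAppendAt cat key item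
      else pvAppendAt cat "#" item) (pvCatState xs)
    = pvCatState (xs ++ l) := by
  induction l generalizing xs with
  | nil => simp
  | cons a l ih =>
    rw [List.foldl_cons]
    rw [show (let key := pvKey a.2;
        if ((pvCatState xs).any fun p => p.1 == key) then pvAppendAt (pvCatState xs) key a
        else pvAppendAt (pvCatState xs) "#" a) = pvCatState (xs ++ [a]) from pvStep xs a]
    rw [ih (xs ++ [a])]
    simp

-- ===== VERDICT (by name: the statement is the Claim_ definition above) =====
theorem catalogFromIterable_spec : Claim_equal_catalogFromIterable := by
  intro iterable _ _
  unfold Spec_catalogFromIterable catalogFromIterable catalogFromIterable_alt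
  have h0 : pvLetters.map (fun k => (k, ([] : List (String × String)))) ++ [("#", ([] : List (String × String)))]
      = pvCatState [] := by
    simp [pvCatState]
  rw [h0]
  have hf := pvFold iterable []
  simp only [List.nil_append] at hf
  rw [hf]
  rfl
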